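-- pv_equiv track=rewrite | github.com/genetrus/MoneyMap | src/money_map/i18n/locale.py | _group_digits
-- ===== SOURCE A (Python) =====
-- def _group_digits(value: str, sep: str) -> str:
--     if len(value) <= 3:
--         return value
--     groups = []
--     while value:
--         groups.append(value[-3:])
--         value = value[:-3]
--     return sep.join(reversed(groups))
-- ===== SOURCE B (Python) =====
-- def _group_digits(value: str, sep: str) -> str:
--     n = len(value)
--     first = n % 3
--     groups = [value[:first]] if first else []
--     for i in range(first, n, 3):
--         groups.append(value[i:i + 3])
--     return sep.join(groups)
-- ===== Notes on version B (the rewrite author's own statement) =====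
-- stated objective: alternative
-- what changed: Replaces A's shrink-from-the-right while-loop plus final reverse with a single left-to-right pass: the leading-group size n % 3 is computed up front and the remaining chunk boundaries are fixed by range(first, n, 3), so there is no reversal, no repeated string shrinking, and no len<=3 special case.
import Mathlib
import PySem

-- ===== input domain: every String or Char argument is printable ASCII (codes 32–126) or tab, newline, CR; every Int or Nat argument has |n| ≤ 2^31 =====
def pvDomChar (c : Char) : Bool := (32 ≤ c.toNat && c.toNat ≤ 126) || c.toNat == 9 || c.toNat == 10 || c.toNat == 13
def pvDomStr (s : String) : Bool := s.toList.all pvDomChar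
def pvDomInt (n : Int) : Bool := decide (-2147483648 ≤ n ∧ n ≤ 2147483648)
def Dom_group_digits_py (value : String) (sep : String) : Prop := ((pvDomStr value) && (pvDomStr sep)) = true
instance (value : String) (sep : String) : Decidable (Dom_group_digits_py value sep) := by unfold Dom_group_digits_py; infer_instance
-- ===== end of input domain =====

-- B replaces A's shrink-from-the-right while-loop plus final reverse with one
-- left-to-right pass whose chunk boundaries are fixed by the precomputed offset n % 3.


-- ===== PORT A =====
-- the while-loop: groups.append(value[-3:]); value = value[:-3]
def pvALoop (v : List Char) (groups : List (List Char)) : List (List Char) :=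
  if _h : v = [] then groups
  else pvALoop (PySem.List.slice v none (some (-3)))
               (groups ++ [PySem.List.slice v (some (-3)) none])
termination_by v.length
decreasing_by
  rw [PySem.List.slice_to_neg_ofNat v 3 (by omega)]
  have : v.length ≠ 0 := by simpa using _h
  simp [List.length_take]; omega

def group_digits_py (value : String) (sep : String) : String :=
  if PySem.Chars.len value.toList ≤ 3 then value
  else String.ofList (PySem.Chars.join sep.toList (pvALoop value.toList []).reverse)

-- ===== PORT B =====
def group_digits_py_alt (value : String) (sep : String) : String :=
  let v := value.toList
  let n : Int := PySem.Chars.len v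
  let first : Int := PySem.Int.mod n 3
  let groups : List (List Char) :=
    if first ≠ 0 then [PySem.List.slice v none (some first)] else []
  let groups := (PySem.List.pyRange first n 3).foldl
    (fun gs i => gs ++ [PySem.List.slice v (some i) (some (i + 3))]) groups
  String.ofList (PySem.Chars.join sep.toList groups)

-- ===== PRECONDITION & SPEC =====
def Spec_group_digits_py (value : String) (sep : String) (out : String) : Prop := out = group_digits_py_alt value sep
instance (value : String) (sep : String) (out : String) : Decidable (Spec_group_digits_py value sep out) := by unfold Spec_group_digits_py; infer_instance

-- ===== CLAIM (what is proved, stated in full; the proofs are below) =====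
def Claim_equal_group_digits_py : Prop := ∀ (value : String) (sep : String), Dom_group_digits_py value sep → Spec_group_digits_py value sep (group_digits_py value sep)

-- ===== LEMMAS AND PROOFS =====

-- the chunk list A's loop builds, read in output (reversed) order
def chunksR (v : List Char) : List (List Char) :=
  if v = [] then []
  else chunksR (v.take (v.length - 3)) ++ [v.drop (v.length - 3)]
termination_by v.length
decreasing_by
  simp [List.length_take]
  rename_i h
  have : v.length ≠ 0 := by simpa using h
  omega

-- front-to-back chunks of three
def chunksF (v : List Char) : List (List Char) :=
  if v = [] then [] else v.take 3 :: chunksF (v.drop 3)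
termination_by v.length
decreasing_by
  rename_i h
  have : v.length ≠ 0 := by simpa using h
  simp; omega

-- B's chunk list
def chunksB (v : List Char) : List (List Char) :=
  (if v.length % 3 ≠ 0 then [v.take (v.length % 3)] else []) ++ chunksF (v.drop (v.length % 3))

theorem pvALoop_reverse (v : List Char) (gs : List (List Char)) :
    (pvALoop v gs).reverse = chunksR v ++ gs.reverse := by
  fun_induction pvALoop v gs with
  | case1 gs => rw [chunksR]; simp
  | case2 v gs h ih =>
    rw [ih]
    rw [show chunksR v = chunksR (v.take (v.length - 3)) ++ [v.drop (v.length - 3)] from by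
      rw [chunksR, if_neg h]]
    rw [PySem.List.slice_to_neg_ofNat v 3 (by omega),
        PySem.List.slice_from_neg_ofNat v 3 (by omega)]
    simp

theorem chunksF_last (ys : List Char) (hd : 3 ∣ ys.length) (hl : 3 ≤ ys.length) :
    chunksF ys = chunksF (ys.take (ys.length - 3)) ++ [ys.drop (ys.length - 3)] := by
  have hne : ys ≠ [] := by intro e; simp [e] at hl
  by_cases h6 : ys.length < 6
  · have h3 : ys.length = 3 := by omega
    rw [chunksF, if_neg hne]
    simp [List.drop_eq_nil_of_le (by omega : ys.length ≤ 3),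
          List.take_of_length_le (by omega : ys.length ≤ 3), chunksF, h3]
  · have ih := chunksF_last (ys.drop 3) (by simp only [List.length_drop]; omega) (by simp only [List.length_drop]; omega)
    rw [chunksF, if_neg hne, ih]
    have hne2 : ys.take (ys.length - 3) ≠ [] := by
      rw [Ne, List.take_eq_nil_iff]
      push Not
      exact ⟨by omega, hne⟩
    rw [show chunksF (ys.take (ys.length - 3))
          = (ys.take (ys.length - 3)).take 3 :: chunksF ((ys.take (ys.length - 3)).drop 3) from by
      rw [chunksF, if_neg hne2]]
    simp only [List.cons_append]
    congr 1
    · rw [List.take_take]; congr 1; omega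
    · congr 1
      · rw [List.drop_take]; congr 2; simp
      · rw [List.drop_drop]; congr 1; simp; omega
termination_by ys.length
decreasing_by simp; omega

theorem chunksR_eq_chunksB (v : List Char) : chunksR v = chunksB v := by
  by_cases hv : v = []
  · subst hv; rw [chunksR]; simp [chunksB, chunksF]
  · have hl0 : v.length ≠ 0 := by simpa using hv
    rw [chunksR, if_neg hv]
    by_cases h3 : v.length ≤ 3
    · rw [show v.length - 3 = 0 by omega]
      simp only [List.take_zero, List.drop_zero]
      rw [chunksR]
      unfold chunksB
      by_cases he : v.length = 3
      · rw [he]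
        simp [chunksF, hv, List.drop_eq_nil_of_le (by omega : v.length ≤ 3),
              List.take_of_length_le (by omega : v.length ≤ 3)]
      · have hr : v.length % 3 = v.length := Nat.mod_eq_of_lt (by omega)
        rw [hr]
        simp [hl0, List.take_of_length_le (le_refl v.length),
              List.drop_eq_nil_of_le (le_refl v.length), chunksF]
    · have ih := chunksR_eq_chunksB (v.take (v.length - 3))
      rw [ih]
      unfold chunksB
      simp only [List.length_take]
      rw [show min (v.length - 3) v.length = v.length - 3 by omega,
          show (v.length - 3) % 3 = v.length % 3 by omega]
      set r := v.length % 3 with hrdef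
      have e1 : (v.take (v.length - 3)).take r = v.take r := by
        rw [List.take_take]; congr 1; omega
      rw [e1]
      have hys := chunksF_last (v.drop r)
        (by simp only [List.length_drop]; omega)
        (by simp only [List.length_drop]; omega)
      have e2 : (v.drop r).take ((v.drop r).length - 3) = (v.take (v.length - 3)).drop r := by
        rw [List.drop_take]; simp only [List.length_drop]; congr 1; omega
      have e3 : (v.drop r).drop ((v.drop r).length - 3) = v.drop (v.length - 3) := by
        rw [List.drop_drop]; simp only [List.length_drop]; congr 1; omega
      rw [e2, e3] at hys
      rw [hys, List.append_assoc]
termination_by v.length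
decreasing_by simp [List.length_take]; omega

theorem pyRange3_nil (a b : Int) (h : b ≤ a) : PySem.List.pyRange a b 3 = [] := by
  rw [PySem.List.pyRange_of_pos a b (by omega)]
  simp [show ¬ a < b by omega]

theorem pyRange3_cons (a b : Int) (h : a < b) :
    PySem.List.pyRange a b 3 = a :: PySem.List.pyRange (a + 3) b 3 := by
  rw [PySem.List.pyRange_of_pos a b (by omega), PySem.List.pyRange_of_pos (a+3) b (by omega)]
  simp only [if_pos h]
  by_cases h2 : a + 3 < b
  · rw [if_pos h2]
    have e1 : ((b - a + 3 - 1) / 3).toNat = ((b - (a+3) + 3 - 1) / 3).toNat + 1 := by omega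
    rw [e1, List.range_succ_eq_map]
    simp [List.map_map, Function.comp]
    intro k _; ring
  · rw [if_neg h2]
    have e1 : ((b - a + 3 - 1) / 3).toNat = 1 := by omega
    rw [e1]
    simp

theorem fold_chunks (v : List Char) (i : Int) (gs : List (List Char))
    (h0 : 0 ≤ i) :
    (PySem.List.pyRange i v.length 3).foldl
      (fun gs j => gs ++ [PySem.List.slice v (some j) (some (j + 3))]) gs
      = gs ++ chunksF (v.drop i.toNat) := by
  by_cases h : i < (v.length : Int)
  · rw [pyRange3_cons _ _ h]
    simp only [List.foldl_cons]
    rw [fold_chunks v (i + 3) (gs ++ [PySem.List.slice v (some i) (some (i + 3))]) (by omega)]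
    rw [show chunksF (v.drop i.toNat)
          = (v.drop i.toNat).take 3 :: chunksF ((v.drop i.toNat).drop 3) from by
      rw [chunksF, if_neg (by
        simp only [List.drop_eq_nil_iff]
        omega)]]
    rw [PySem.List.slice_toNat v h0 (by omega)]
    rw [show (i + 3).toNat - i.toNat = 3 by omega, List.drop_drop,
        show i.toNat + 3 = (i + 3).toNat by omega]
    simp
  · rw [pyRange3_nil _ _ (by omega)]
    rw [List.drop_eq_nil_of_le (by omega : v.length ≤ i.toNat), chunksF]
    simp
termination_by (v.length - i).toNat
decreasing_by omega

theorem alt_eq (value sep : String) :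
    group_digits_py_alt value sep
      = String.ofList (PySem.Chars.join sep.toList (chunksB value.toList)) := by
  unfold group_digits_py_alt
  simp only [PySem.Chars.len]
  set v := value.toList with hv
  have hmod1 : PySem.Int.mod ((v.length : Int)) 3 = (v.length : Int) % 3 := by
    simp [PySem.Int.mod, Int.fmod_eq_emod_of_nonneg]
  have hmod : PySem.Int.mod ((v.length : Int)) 3 = ((v.length % 3 : Nat) : Int) := by
    rw [hmod1]; push_cast; ring
  rw [hmod]
  rw [fold_chunks v ((v.length % 3 : Nat) : Int) _ (by positivity)]
  rw [PySem.List.slice_to v (by positivity)]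
  unfold chunksB
  simp only [Int.toNat_natCast, ne_eq, Nat.cast_eq_zero]

theorem chunksB_short (s v : List Char) (h : v.length ≤ 3) :
    PySem.Chars.join s (chunksB v) = v := by
  by_cases hv : v = []
  · simp [hv, chunksB, chunksF, PySem.Chars.join_nil]
  · have hl0 : v.length ≠ 0 := by simpa using hv
    unfold chunksB
    by_cases he : v.length = 3
    · rw [he]
      norm_num
      rw [chunksF, if_neg hv,
          List.drop_eq_nil_of_le (by omega : v.length ≤ 3), chunksF,
          List.take_of_length_le (by omega : v.length ≤ 3)]
      simp [PySem.Chars.join_singleton]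
    · rw [Nat.mod_eq_of_lt (by omega : v.length < 3)]
      rw [List.take_of_length_le (le_refl v.length),
          List.drop_eq_nil_of_le (le_refl v.length), chunksF]
      simp [hl0, PySem.Chars.join_singleton]

-- ===== VERDICT (by name: the statement is the Claim_ definition above) =====
theorem group_digits_py_spec : Claim_equal_group_digits_py := by
  intro value sep _
  unfold Spec_group_digits_py
  rw [alt_eq]
  unfold group_digits_py
  by_cases h : PySem.Chars.len value.toList ≤ 3
  · rw [if_pos h]
    rw [chunksB_short sep.toList value.toList (by simpa [PySem.Chars.len] using h)]
    exact String.ofList_toList.symm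
  · rw [if_neg h]
    congr 2
    have := pvALoop_reverse value.toList []
    simp only [List.reverse_nil, List.append_nil] at this
    rw [this, chunksR_eq_chunksB]
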